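-- pv_equiv track=rewrite | github.com/john-kurkowski/barflyextract | src/barflyextract/extract.py | _split_recipe_blocks
-- ===== SOURCE A (Python) =====
-- def _split_recipe_blocks(recipe: str) -> list[str]:
--     """Split a recipe into "##" headed blocks for cross-item deduping."""
--     blocks: list[str] = []
--     current: list[str] = []
--     for line in recipe.splitlines():
--         if line.startswith("## ") and current:
--             blocks.append("\n".join(current).strip())
--             current = []
--         current.append(line)
--     if current:
--         blocks.append("\n".join(current).strip())
--     return blocks
-- ===== SOURCE B (Python) =====
-- def _split_recipe_blocks(recipe: str) -> list[str]:
--     """Split a recipe into "##" headed blocks for cross-item deduping."""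
--     lines = recipe.splitlines()
--     n = len(lines)
--     blocks = []
--     i = 0
--     while i < n:
--         j = i + 1
--         while j < n and not lines[j].startswith("## "):
--             j += 1
--         blocks.append("\n".join(lines[i:j]).strip())
--         i = j
--     return blocks
-- ===== Notes on version B (the rewrite author's own statement) =====
-- stated objective: alternative
-- what changed: Replaces A's incremental state machine (blocks/current accumulators flushed on each header) by index-based two-pointer slicing: for each block start, scan forward to the next '## ' header and slice-join-strip lines[i:j] directly.
import Mathlib
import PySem

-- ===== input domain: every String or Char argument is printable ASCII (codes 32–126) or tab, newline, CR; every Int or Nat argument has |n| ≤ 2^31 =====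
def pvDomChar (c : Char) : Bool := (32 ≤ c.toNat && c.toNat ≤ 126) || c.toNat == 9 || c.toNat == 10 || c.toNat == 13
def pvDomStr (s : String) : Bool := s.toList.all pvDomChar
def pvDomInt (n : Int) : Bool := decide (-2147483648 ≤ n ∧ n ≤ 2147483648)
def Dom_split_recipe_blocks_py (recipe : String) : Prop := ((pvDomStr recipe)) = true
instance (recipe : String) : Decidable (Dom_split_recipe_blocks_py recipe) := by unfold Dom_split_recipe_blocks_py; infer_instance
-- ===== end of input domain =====

-- B replaces A's accumulator state machine by index-based scanning and slicing of the line list (same cost, different decomposition).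


-- ===== PORT A =====
-- one loop iteration: flush current into blocks when a "## " header arrives and current is nonempty, then append the line
def pvStepA (st : List String × List String) (line : String) : List String × List String :=
  if PySem.Str.startswith line "## " && !st.2.isEmpty then
    (st.1 ++ [PySem.Str.strip (PySem.Str.join "\n" st.2)], [line])
  else
    (st.1, st.2 ++ [line])

def split_recipe_blocks_py (recipe : String) : List String :=
  let st := (PySem.Str.splitlines recipe).foldl pvStepA ([], [])
  if !st.2.isEmpty then st.1 ++ [PySem.Str.strip (PySem.Str.join "\n" st.2)] else st.1

-- ===== PORT B =====
-- inner while loop of Source B: number of consecutive non-header lines at the front (j - i - 1)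
def pvScanB : List String → Nat
  | [] => 0
  | x :: xs => if PySem.Str.startswith x "## " then 0 else pvScanB xs + 1

-- outer while loop of Source B, as recursion on the suffix lines[i:]
def pvGroupsB : List String → List String
  | [] => []
  | l :: ls =>
    let k := pvScanB ls
    PySem.Str.strip (PySem.Str.join "\n" (l :: ls.take k)) :: pvGroupsB (ls.drop k)
termination_by lines => lines.length
decreasing_by simp only [List.length_drop, List.length_cons]; omega

def split_recipe_blocks_py_alt (recipe : String) : List String :=
  pvGroupsB (PySem.Str.splitlines recipe)

-- ===== PRECONDITION & SPEC =====
def Spec_split_recipe_blocks_py (recipe : String) (out : List String) : Prop := out = split_recipe_blocks_py_alt recipe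
instance (recipe : String) (out : List String) : Decidable (Spec_split_recipe_blocks_py recipe out) := by unfold Spec_split_recipe_blocks_py; infer_instance

-- ===== CLAIM (what is proved, stated in full; the proofs are below) =====
def Claim_equal_split_recipe_blocks_py : Prop := ∀ (recipe : String), Dom_split_recipe_blocks_py recipe → Spec_split_recipe_blocks_py recipe (split_recipe_blocks_py recipe)

-- ===== LEMMAS AND PROOFS =====

-- finishing step of A (the trailing "if current: blocks.append(...)")
def pvFinishA (st : List String × List String) : List String :=
  if !st.2.isEmpty then st.1 ++ [PySem.Str.strip (PySem.Str.join "\n" st.2)] else st.1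

theorem pvGroupsB_nil : pvGroupsB [] = [] := by
  rw [pvGroupsB.eq_def]

theorem pvGroupsB_cons (l : String) (ls : List String) :
    pvGroupsB (l :: ls) =
      PySem.Str.strip (PySem.Str.join "\n" (l :: ls.take (pvScanB ls)))
        :: pvGroupsB (ls.drop (pvScanB ls)) := by
  rw [pvGroupsB.eq_def]

-- loop invariant: with a nonempty current, A's remaining run yields the already
-- collected blocks followed by B's grouping of current ++ remaining lines
theorem pvLoopA_eq (ls : List String) : ∀ (blocks current : List String), current ≠ [] →
    pvFinishA (ls.foldl pvStepA (blocks, current)) =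
      blocks ++ (PySem.Str.strip (PySem.Str.join "\n" (current ++ ls.take (pvScanB ls)))
                  :: pvGroupsB (ls.drop (pvScanB ls))) := by
  induction ls with
  | nil =>
    intro blocks current h
    simp [pvGroupsB_nil, pvFinishA, h]
  | cons x xs ih =>
    intro blocks current h
    by_cases hx : PySem.Chars.startswith x.toList ['#', '#', ' '] = true
    · have hstep : pvStepA (blocks, current) x
          = (blocks ++ [PySem.Str.strip (PySem.Str.join "\n" current)], [x]) := by
        simp [pvStepA, hx, h]
      rw [List.foldl_cons, hstep, ih _ [x] (by simp)]
      simp [pvScanB, hx, pvGroupsB_cons]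
    · have hstep : pvStepA (blocks, current) x = (blocks, current ++ [x]) := by
        simp [pvStepA, hx]
      rw [List.foldl_cons, hstep, ih _ (current ++ [x]) (by simp)]
      simp [pvScanB, hx, List.append_assoc]

-- ===== VERDICT (by name: the statement is the Claim_ definition above) =====
theorem split_recipe_blocks_py_spec : Claim_equal_split_recipe_blocks_py := by
  intro recipe _
  unfold Spec_split_recipe_blocks_py split_recipe_blocks_py split_recipe_blocks_py_alt
  cases hls : PySem.Str.splitlines recipe with
  | nil => simp [pvGroupsB_nil]
  | cons l ls =>
    have hstep : pvStepA ([], []) l = ([], [l]) := by simp [pvStepA]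
    show pvFinishA ((l :: ls).foldl pvStepA ([], [])) = _
    rw [List.foldl_cons, hstep, pvLoopA_eq ls [] [l] (by simp), pvGroupsB_cons]
    simp
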